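-- pv_equiv track=rewrite | github.com/MerowingerX/Sportplatz-Buchung | booking/field_config.py | get_conflict_sources
-- ===== SOURCE A (Python) =====
-- def get_conflict_sources(visible_field_ids: list[str]) -> dict[str, list[str]]:
--     """
--     Liefert für jedes Feld die Liste der Felder, die es blockieren.
--     Konfliktlogik: f1 und f2 blockieren sich, wenn einer ein Präfix des anderen ist.
--     Beispiel: "A" blockiert "AA" und "AB" (und umgekehrt).
--     """
--     result: dict[str, list[str]] = {}
--     for f in visible_field_ids:
--         result[f] = [
--             g for g in visible_field_ids
--             if g != f and (f.startswith(g) or g.startswith(f))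
--         ]
--     return result
-- ===== SOURCE B (Python) =====
-- def get_conflict_sources(visible_field_ids: list[str]) -> dict[str, list[str]]:
--     # Prefix-index rewrite: instead of running startswith on every pair, index each
--     # distinct id's proper prefixes once (desc[p] = distinct ids that extend p), then
--     # each field's conflict set is desc[f] | {prefixes of f that are present}, and its
--     # list is a membership filter over the original order.
--     distinct = list(dict.fromkeys(visible_field_ids))
--     desc = {g: set() for g in distinct}
--     for g in distinct:
--         for k in range(len(g)):
--             p = g[:k]
--             if p in desc:
--                 desc[p].add(g)
--     result = {}
--     for f in visible_field_ids:
--         cs = desc[f] | {f[:k] for k in range(len(f)) if f[:k] in desc}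
--         result[f] = [g for g in visible_field_ids if g in cs]
--     return result
-- ===== Notes on version B (the rewrite author's own statement) =====
-- stated objective: faster
-- what changed: Replaces the all-pairs startswith scan by a prefix index built once over the distinct ids (desc[p] = ids extending p); each field's conflict set is then its indexed extensions plus its own prefixes that are present, and its list is a set-membership filter over the original order.
import Mathlib
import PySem

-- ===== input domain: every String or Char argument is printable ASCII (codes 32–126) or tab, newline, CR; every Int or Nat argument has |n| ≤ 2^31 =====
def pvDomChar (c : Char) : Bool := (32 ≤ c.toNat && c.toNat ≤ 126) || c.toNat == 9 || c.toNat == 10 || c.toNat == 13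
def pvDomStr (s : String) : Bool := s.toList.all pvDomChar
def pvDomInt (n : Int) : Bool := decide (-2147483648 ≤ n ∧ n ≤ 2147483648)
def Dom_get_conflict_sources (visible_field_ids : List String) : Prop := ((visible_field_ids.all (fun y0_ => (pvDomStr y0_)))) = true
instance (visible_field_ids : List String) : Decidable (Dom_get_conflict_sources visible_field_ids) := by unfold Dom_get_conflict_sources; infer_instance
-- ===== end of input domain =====

-- B replaces A's all-pairs startswith scan by a prefix index built once over the
-- distinct ids; objective: faster (constant-factor, measured).

-- ===== PORT A =====
def get_conflict_sources (visible_field_ids : List String) : List (String × List String) :=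
  (visible_field_ids.foldl
    (fun result f =>
      result.insert f (visible_field_ids.filter
        (fun g => g != f && (PySem.Str.startswith f g || PySem.Str.startswith g f))))
    (PySem.Dict.empty : PySem.Dict String (List String))).items

-- ===== PORT B =====  (transliteration of Source B)
-- the body of `for k in range(len(g)): p = g[:k]; if p in desc: desc[p].add(g)`
def pvDescStep (d : PySem.Dict String (PySem.Set String)) (g : String) : PySem.Dict String (PySem.Set String) :=
  (PySem.List.pyRange 0 (PySem.Str.len g) 1).foldl
    (fun d k =>
      if d.contains (PySem.Str.slice g none (some k)) then
        d.modify (PySem.Str.slice g none (some k)) PySem.Set.empty (fun s => PySem.Set.add s g)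
      else d)
    d

-- `desc = {g: set() for g in distinct}` followed by the descendant-filling loop
def pvDesc (distinct : List String) : PySem.Dict String (PySem.Set String) :=
  distinct.foldl pvDescStep
    (distinct.foldl (fun d g => d.insert g PySem.Set.empty) PySem.Dict.empty)

-- `cs = desc[f] | {f[:k] for k in range(len(f)) if f[:k] in desc}`
-- (`desc[f]` ported as getD: f is always a key, every f comes from visible_field_ids)
def pvConf (desc : PySem.Dict String (PySem.Set String)) (f : String) : PySem.Set String :=
  PySem.Set.union (desc.getD f PySem.Set.empty)
    (PySem.Set.ofList
      (((PySem.List.pyRange 0 (PySem.Str.len f) 1).filter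
          (fun k => desc.contains (PySem.Str.slice f none (some k)))).map
        (fun k => PySem.Str.slice f none (some k))))

def get_conflict_sources_alt (visible_field_ids : List String) : List (String × List String) :=
  (visible_field_ids.foldl
    (fun result f =>
      result.insert f (visible_field_ids.filter
        (fun g => PySem.Set.contains (pvConf (pvDesc (PySem.List.dedup visible_field_ids)) f) g)))
    (PySem.Dict.empty : PySem.Dict String (List String))).items

-- ===== PRECONDITION & SPEC =====
def Spec_get_conflict_sources (visible_field_ids : List String) (out : List (String × List String)) : Prop := out = get_conflict_sources_alt visible_field_ids
instance (visible_field_ids : List String) (out : List (String × List String)) : Decidable (Spec_get_conflict_sources visible_field_ids out) := by unfold Spec_get_conflict_sources; infer_instance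

-- ===== CLAIM (what is proved, stated in full; the proofs are below) =====
def Claim_equal_get_conflict_sources : Prop := ∀ (visible_field_ids : List String), Dom_get_conflict_sources visible_field_ids → Spec_get_conflict_sources visible_field_ids (get_conflict_sources visible_field_ids)

-- ===== LEMMAS AND PROOFS =====

-- proper-prefix relation on strings
def pvPP (p g : String) : Prop := p.toList <+: g.toList ∧ p ≠ g

lemma pv_slice_toList (g : String) (k : Int) (h : 0 ≤ k) :
    (PySem.Str.slice g none (some k)).toList = g.toList.take k.toNat := by
  simp [PySem.List.slice_to _ h]

-- the slices g[:k], 0 ≤ k < len(g), are exactly the proper prefixes of g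
lemma pv_ex_slice_iff (p g : String) :
    (∃ k ∈ PySem.List.pyRange 0 (PySem.Str.len g) 1, p = PySem.Str.slice g none (some k)) ↔ pvPP p g := by
  constructor
  · rintro ⟨k, hk, rfl⟩
    rw [PySem.List.mem_pyRange_one] at hk
    obtain ⟨h0, hlt⟩ := hk
    rw [PySem.Str.len_eq] at hlt
    have ht := pv_slice_toList g k h0
    refine ⟨by rw [ht]; exact List.take_prefix _ _, fun he => ?_⟩
    have h2 : (PySem.Str.slice g none (some k)).toList = g.toList := by rw [he]
    rw [ht] at h2
    have hlen := congrArg List.length h2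
    rw [List.length_take] at hlen
    omega
  · rintro ⟨hpre, hne⟩
    have hnl : p.toList ≠ g.toList := fun h => hne (String.toList_inj.mp h)
    have hlt : p.toList.length < g.toList.length :=
      lt_of_le_of_ne hpre.length_le (fun h => hnl (hpre.eq_of_length h))
    refine ⟨(p.toList.length : Int), ?_, ?_⟩
    · rw [PySem.List.mem_pyRange_one, PySem.Str.len_eq]
      exact ⟨by positivity, by exact_mod_cast hlt⟩
    · apply String.toList_inj.mp
      rw [pv_slice_toList g _ (by positivity)]
      simp
      exact List.prefix_iff_eq_take.mp hpre

-- the inner loop never changes the key set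
lemma pv_descStep_contains (d : PySem.Dict String (PySem.Set String)) (g q : String) :
    (pvDescStep d g).contains q = d.contains q := by
  unfold pvDescStep
  generalize PySem.List.pyRange 0 (PySem.Str.len g) 1 = ks
  induction ks generalizing d with
  | nil => rfl
  | cons k ks ih =>
    simp only [List.foldl_cons]
    rw [ih]
    by_cases h : d.contains (PySem.Str.slice g none (some k)) = true
    · simp only [h, if_true, PySem.Dict.contains_modify]
      cases hq : q == PySem.Str.slice g none (some k)
      · simp
      · simp only [Bool.true_or]
        rw [eq_of_beq hq, h]
    · simp [h]

-- membership after the inner loop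
lemma pv_descStep_mem (d : PySem.Dict String (PySem.Set String)) (g x p : String) :
    x ∈ (pvDescStep d g).getD p PySem.Set.empty ↔
      x ∈ d.getD p PySem.Set.empty ∨
        (x = g ∧ d.contains p = true ∧
          ∃ k ∈ PySem.List.pyRange 0 (PySem.Str.len g) 1, p = PySem.Str.slice g none (some k)) := by
  unfold pvDescStep
  generalize PySem.List.pyRange 0 (PySem.Str.len g) 1 = ks
  induction ks generalizing d with
  | nil => simp
  | cons k ks ih =>
    simp only [List.foldl_cons]
    rw [ih]
    by_cases h : d.contains (PySem.Str.slice g none (some k)) = true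
    · simp only [h, if_true, PySem.Dict.contains_modify, PySem.Dict.getD_modify]
      by_cases hp : p = PySem.Str.slice g none (some k)
      · subst hp
        rw [if_pos rfl]
        simp only [PySem.Set.mem_add, beq_self_eq_true, Bool.true_or]
        constructor
        · rintro ((hx | rfl) | ⟨rfl, -, -⟩)
          · exact Or.inl hx
          · exact Or.inr ⟨rfl, h, k, List.mem_cons_self .., rfl⟩
          · exact Or.inr ⟨rfl, h, k, List.mem_cons_self .., rfl⟩
        · rintro (hx | ⟨rfl, -, -⟩)
          · exact Or.inl (Or.inl hx)
          · exact Or.inl (Or.inr rfl)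
      · rw [if_neg hp]
        have hb : (p == PySem.Str.slice g none (some k)) = false := beq_eq_false_iff_ne.mpr hp
        rw [hb, Bool.false_or]
        constructor
        · rintro (hx | ⟨rfl, hc, k', hk', hp'⟩)
          · exact Or.inl hx
          · exact Or.inr ⟨rfl, hc, k', List.mem_cons_of_mem _ hk', hp'⟩
        · rintro (hx | ⟨rfl, hc, k', hk', hp'⟩)
          · exact Or.inl hx
          · rcases List.mem_cons.mp hk' with rfl | hk''
            · exact absurd hp' hp
            · exact Or.inr ⟨rfl, hc, k', hk'', hp'⟩
    · rw [if_neg h]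
      constructor
      · rintro (hx | ⟨rfl, hc, k', hk', hp'⟩)
        · exact Or.inl hx
        · exact Or.inr ⟨rfl, hc, k', List.mem_cons_of_mem _ hk', hp'⟩
      · rintro (hx | ⟨rfl, hc, k', hk', hp'⟩)
        · exact Or.inl hx
        · rcases List.mem_cons.mp hk' with rfl | hk''
          · exact absurd (hp' ▸ hc) h
          · exact Or.inr ⟨rfl, hc, k', hk'', hp'⟩

lemma pv_outer_contains (l : List String) (d : PySem.Dict String (PySem.Set String)) (q : String) :
    (l.foldl pvDescStep d).contains q = d.contains q := by
  induction l generalizing d with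
  | nil => rfl
  | cons g l ih => rw [List.foldl_cons, ih, pv_descStep_contains]

lemma pv_outer_mem (l : List String) (d : PySem.Dict String (PySem.Set String)) (x p : String) :
    x ∈ (l.foldl pvDescStep d).getD p PySem.Set.empty ↔
      x ∈ d.getD p PySem.Set.empty ∨
        (d.contains p = true ∧ ∃ g ∈ l, x = g ∧ pvPP p g) := by
  induction l generalizing d with
  | nil => simp
  | cons g l ih =>
    rw [List.foldl_cons, ih, pv_descStep_mem, pv_descStep_contains]
    constructor
    · rintro ((hx | ⟨hxg, hc, hk⟩) | ⟨hc, gg, hgg, hxg, hpp⟩)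
      · exact Or.inl hx
      · subst hxg
        exact Or.inr ⟨hc, x, List.mem_cons_self .., rfl, (pv_ex_slice_iff p x).mp hk⟩
      · subst hxg
        exact Or.inr ⟨hc, x, List.mem_cons_of_mem _ hgg, rfl, hpp⟩
    · rintro (hx | ⟨hc, gg, hgg, hxg, hpp⟩)
      · exact Or.inl (Or.inl hx)
      · subst hxg
        rcases List.mem_cons.mp hgg with h1 | h1
        · exact Or.inl (Or.inr ⟨h1, hc, (pv_ex_slice_iff p g).mpr (h1 ▸ hpp)⟩)
        · exact Or.inr ⟨hc, x, h1, rfl, hpp⟩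

lemma pv_init_getD (l : List String) (d : PySem.Dict String (PySem.Set String)) (p : String) :
    (l.foldl (fun d g => d.insert g PySem.Set.empty) d).getD p PySem.Set.empty
      = if p ∈ l then PySem.Set.empty else d.getD p PySem.Set.empty := by
  induction l generalizing d with
  | nil => simp
  | cons g l ih =>
    rw [List.foldl_cons, ih]
    by_cases hp : p ∈ l
    · simp [hp]
    · by_cases hg : p = g
      · simp [hg, PySem.Dict.getD_insert_self]
      · simp [hp, hg, PySem.Dict.getD_insert_of_ne _ _ _ hg]

lemma pv_init_contains (l : List String) (d : PySem.Dict String (PySem.Set String)) (p : String) :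
    (l.foldl (fun d g => d.insert g PySem.Set.empty) d).contains p
      = (decide (p ∈ l) || d.contains p) := by
  induction l generalizing d with
  | nil => simp
  | cons g l ih =>
    rw [List.foldl_cons, ih, PySem.Dict.contains_insert]
    by_cases hg : p = g
    · subst hg; simp [List.mem_cons]
    · have hb : (p == g) = false := beq_eq_false_iff_ne.mpr hg
      simp [List.mem_cons, hg, hb]

-- the prefix index characterised: x conflicts-from-above with p
lemma pv_desc_mem (distinct : List String) (x p : String) :
    x ∈ (pvDesc distinct).getD p PySem.Set.empty ↔
      p ∈ distinct ∧ x ∈ distinct ∧ pvPP p x := by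
  unfold pvDesc
  rw [pv_outer_mem, pv_init_getD, pv_init_contains]
  have he : (PySem.Dict.empty : PySem.Dict String (PySem.Set String)).getD p PySem.Set.empty
      = PySem.Set.empty := rfl
  have hc : (PySem.Dict.empty : PySem.Dict String (PySem.Set String)).contains p = false := rfl
  rw [he, hc]
  by_cases hp : p ∈ distinct
  · simp only [hp, if_true, decide_true, Bool.true_or, true_and]
    have hne : x ∈ (PySem.Set.empty : PySem.Set String) ↔ False := by
      simp [PySem.Set.empty]
    rw [hne]
    simp only [false_or]
    constructor
    · rintro ⟨gg, hgg, rfl, hpp⟩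
      exact ⟨hgg, hpp⟩
    · rintro ⟨hxd, hpp⟩
      exact ⟨x, hxd, rfl, hpp⟩
  · simp [hp, PySem.Set.empty]

lemma pv_desc_contains (distinct : List String) (p : String) :
    (pvDesc distinct).contains p = decide (p ∈ distinct) := by
  unfold pvDesc
  rw [pv_outer_contains, pv_init_contains]
  simp [PySem.Dict.empty, PySem.Dict.contains]

-- the conflict set characterised
lemma pv_conf_mem (distinct : List String) (f g : String) :
    PySem.Set.contains (pvConf (pvDesc distinct) f) g = true ↔
      (f ∈ distinct ∧ g ∈ distinct ∧ pvPP f g) ∨ (g ∈ distinct ∧ pvPP g f) := by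
  unfold pvConf
  rw [PySem.Set.contains_iff, PySem.Set.mem_union, pv_desc_mem, PySem.Set.mem_ofList]
  simp only [List.mem_map, List.mem_filter]
  constructor
  · rintro (h | ⟨k, ⟨hk, hc⟩, rfl⟩)
    · exact Or.inl h
    · rw [pv_desc_contains] at hc
      refine Or.inr ⟨by simpa using hc, (pv_ex_slice_iff _ f).mp ⟨k, hk, rfl⟩⟩
  · rintro (h | ⟨hg, hpp⟩)
    · exact Or.inl h
    · obtain ⟨k, hk, rfl⟩ := (pv_ex_slice_iff g f).mpr hpp
      exact Or.inr ⟨k, ⟨hk, by rw [pv_desc_contains]; simpa using hg⟩, rfl⟩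

-- the two per-field predicates agree on members of the list
lemma pv_pred_eq (ids : List String) (f g : String) (hf : f ∈ ids) (hg : g ∈ ids) :
    (g != f && (PySem.Str.startswith f g || PySem.Str.startswith g f))
      = PySem.Set.contains (pvConf (pvDesc (PySem.List.dedup ids)) f) g := by
  rw [Bool.eq_iff_iff]
  rw [pv_conf_mem]
  have hfd : f ∈ PySem.List.dedup ids := (PySem.List.mem_dedup ids f).mpr hf
  have hgd : g ∈ PySem.List.dedup ids := (PySem.List.mem_dedup ids g).mpr hg
  simp only [hfd, hgd, true_and, Bool.and_eq_true, bne_iff_ne, ne_eq, Bool.or_eq_true,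
    PySem.Str.startswith_eq]
  rw [PySem.Chars.startswith_iff, PySem.Chars.startswith_iff]
  unfold pvPP
  constructor
  · rintro ⟨hne, h | h⟩
    · exact Or.inr ⟨h, hne⟩
    · exact Or.inl ⟨h, fun e => hne e.symm⟩
  · rintro (⟨h, hne⟩ | ⟨h, hne⟩)
    · exact ⟨fun e => hne e.symm, Or.inr h⟩
    · exact ⟨hne, Or.inl h⟩

-- ===== VERDICT (by name: the statement is the Claim_ definition above) =====
theorem get_conflict_sources_spec : Claim_equal_get_conflict_sources := by
  intro ids _
  unfold Spec_get_conflict_sources get_conflict_sources get_conflict_sources_alt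
  apply congrArg PySem.Dict.items
  apply PySem.List.foldl_congr_mem
  intro acc f hf
  refine congrArg (acc.insert f) (List.filter_congr ?_)
  intro g hg
  exact pv_pred_eq ids f g hf hg
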